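-- pv_equiv track=rewrite | github.com/shinychan95/C_oala | project/research/chanyoung/__init__.py | remain_most_region
-- ===== SOURCE A (Python) =====
-- def remain_most_region(result, sentences):
--     most = []
--     compare = 0
--     for region in result:
--         count = sentences.count(region)
--         if count < 2:
--             pass
--         elif count == compare:
--             most.append(region)
--         elif count > compare:
--             most = [region]
--             compare = count
--     return most
-- ===== SOURCE B (Python) =====
-- def remain_most_region(result, sentences):
--     tally = {}
--     for w in sentences:
--         tally[w] = tally.get(w, 0) + 1
--     best = max((tally.get(r, 0) for r in result if tally.get(r, 0) >= 2), default=0)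
--     if best < 2:
--         return []
--     return [r for r in result if tally.get(r, 0) == best]
-- ===== Notes on version B (the rewrite author's own statement) =====
-- stated objective: faster
-- what changed: Replaces A's single-pass running-max-with-reset state machine (which calls sentences.count inside the loop) by a tally dict built once over sentences, then a two-pass decomposition: find the maximum count among regions occurring at least twice, then filter the regions whose count equals it.
import Mathlib
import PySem

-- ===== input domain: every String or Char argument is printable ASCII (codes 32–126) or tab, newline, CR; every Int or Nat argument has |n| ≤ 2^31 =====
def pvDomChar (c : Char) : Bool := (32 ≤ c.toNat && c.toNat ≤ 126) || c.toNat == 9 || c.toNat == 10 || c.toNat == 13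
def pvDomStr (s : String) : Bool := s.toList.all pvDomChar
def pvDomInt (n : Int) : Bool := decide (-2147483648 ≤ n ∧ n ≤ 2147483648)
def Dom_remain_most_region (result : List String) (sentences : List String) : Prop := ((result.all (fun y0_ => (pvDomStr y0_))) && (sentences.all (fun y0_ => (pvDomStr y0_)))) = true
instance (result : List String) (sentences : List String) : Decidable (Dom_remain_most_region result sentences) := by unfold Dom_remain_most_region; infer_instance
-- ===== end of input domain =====

-- B replaces A's running-max-with-reset loop (sentences.count per element) by a tally dict built once, then find-max/filter; measurably faster on large inputs.


-- ===== PORT A =====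
-- loop body of A's for-loop, as a named step function over the state (most, compare)
def pvStepA (sentences : List String) (st : List String × Nat) (region : String) : List String × Nat :=
  let count := PySem.List.count sentences region
  if count < 2 then st
  else if count == st.2 then (st.1 ++ [region], st.2)
  else if count > st.2 then ([region], count)
  else st

def remain_most_region (result : List String) (sentences : List String) : List String :=
  (result.foldl (pvStepA sentences) ([], 0)).1

-- ===== PORT B =====
def remain_most_region_alt (result : List String) (sentences : List String) : List String :=
  let tally : PySem.Dict String Int :=
    sentences.foldl (fun d w => d.insert w (d.getD w 0 + 1)) PySem.Dict.empty
  let best : Int :=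
    match PySem.List.max?
        ((result.filter (fun r => 2 ≤ tally.getD r 0)).map (fun r => tally.getD r 0))
        (fun y => y) with
    | some m => m
    | none => 0
  if best < 2 then []
  else result.filter (fun r => tally.getD r 0 == best)

-- ===== PRECONDITION & SPEC =====
def Spec_remain_most_region (result : List String) (sentences : List String) (out : List String) : Prop := out = remain_most_region_alt result sentences
instance (result : List String) (sentences : List String) (out : List String) : Decidable (Spec_remain_most_region result sentences out) := by unfold Spec_remain_most_region; infer_instance

-- ===== CLAIM (what is proved, stated in full; the proofs are below) =====
def Claim_equal_remain_most_region : Prop := ∀ (result : List String) (sentences : List String), Dom_remain_most_region result sentences → Spec_remain_most_region result sentences (remain_most_region result sentences)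

-- ===== LEMMAS AND PROOFS =====

-- A's loop body with the count function abstracted (f plays 'sentences.count')
def pvStepF (f : String → Nat) (st : List String × Nat) (region : String) : List String × Nat :=
  if f region < 2 then st
  else if f region == st.2 then (st.1 ++ [region], st.2)
  else if f region > st.2 then ([region], f region) else st

theorem stepA_eq_stepF (sentences : List String) :
    pvStepA sentences = pvStepF (fun r => PySem.List.count sentences r) := by
  funext st r
  simp only [pvStepA, pvStepF]

-- running maximum of counts that are ≥ 2, as A's compare evolves
def pvG (f : String → Nat) (xs : List String) (comp : Nat) : Nat :=
  xs.foldl (fun a r => if 2 ≤ f r then max a (f r) else a) comp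

theorem pvG_nil (f : String → Nat) (comp : Nat) : pvG f [] comp = comp := rfl

theorem pvG_cons (f : String → Nat) (x : String) (xs : List String) (comp : Nat) :
    pvG f (x :: xs) comp = pvG f xs (if 2 ≤ f x then max comp (f x) else comp) := by
  simp [pvG, List.foldl]

theorem pvG_le (f : String → Nat) (xs : List String) (comp : Nat) : comp ≤ pvG f xs comp := by
  induction xs generalizing comp with
  | nil => simp [pvG_nil]
  | cons x xs ih =>
    rw [pvG_cons]
    split
    · exact le_trans (le_max_left _ _) (ih _)
    · exact ih _

theorem pvG_cases (f : String → Nat) (xs : List String) (comp : Nat)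
    (h : comp = 0 ∨ 2 ≤ comp) : pvG f xs comp = 0 ∨ 2 ≤ pvG f xs comp := by
  induction xs generalizing comp with
  | nil => simpa [pvG_nil] using h
  | cons x xs ih =>
    rw [pvG_cons]
    split
    · exact ih _ (Or.inr (le_trans (by assumption) (le_max_right _ _)))
    · exact ih _ h

-- main invariant for A's most component, once compare has reached a value ≥ 2
theorem mostF_eq (f : String → Nat) (xs : List String) (most : List String) (comp : Nat)
    (hc : 2 ≤ comp) :
    (xs.foldl (pvStepF f) (most, comp)).1 =
      if pvG f xs comp = comp then most ++ xs.filter (fun r => f r == comp)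
      else xs.filter (fun r => f r == pvG f xs comp) := by
  induction xs generalizing most comp with
  | nil => simp [pvG_nil]
  | cons x xs ih =>
    rw [List.foldl_cons, pvG_cons]
    by_cases hx : 2 ≤ f x
    · rw [if_pos hx]
      rcases lt_trichotomy (f x) comp with hlt | heq | hgt
      · -- f x < comp (and ≥ 2): state unchanged, max is comp
        have hs : pvStepF f (most, comp) x = (most, comp) := by
          simp only [pvStepF]
          rw [if_neg (by omega), if_neg (by simp only [beq_iff_eq]; omega),
            if_neg (by simp only [gt_iff_lt, not_lt]; omega)]
        rw [hs, max_eq_left (le_of_lt hlt), ih most comp hc]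
        have hne : ¬ (f x == comp) = true := by simp only [beq_iff_eq]; omega
        have hne2 : ¬ (f x == pvG f xs comp) = true := by
          simp only [beq_iff_eq]; have := pvG_le f xs comp; omega
        split
        · simp [hne]
        · simp [hne2]
      · -- f x == comp: append
        have hs : pvStepF f (most, comp) x = (most ++ [x], comp) := by
          simp only [pvStepF]
          rw [if_neg (by omega), if_pos (by simp only [beq_iff_eq]; omega)]
        rw [hs, max_eq_left (le_of_eq heq), ih (most ++ [x]) comp hc]
        have he : (f x == comp) = true := by simp only [beq_iff_eq]; omega
        split
        · simp [he]
        · next hg =>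
          have hne2 : ¬ (f x == pvG f xs comp) = true := by
            simp only [beq_iff_eq]; have := pvG_le f xs comp; omega
          simp [hne2]
      · -- f x > comp: reset
        have hs : pvStepF f (most, comp) x = ([x], f x) := by
          simp only [pvStepF]
          rw [if_neg (by omega), if_neg (by simp only [beq_iff_eq]; omega),
            if_pos (by simp only [gt_iff_lt]; omega)]
        rw [hs, max_eq_right (le_of_lt hgt), ih [x] _ hx]
        have hgle := pvG_le f xs (f x)
        have hGc : ¬ pvG f xs (f x) = comp := by omega
        rw [if_neg hGc]
        split
        · next hg => rw [hg]; simp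
        · next hg =>
          have hne2 : ¬ (f x == pvG f xs (f x)) = true := by simp only [beq_iff_eq]; omega
          simp [hne2]
    · -- f x < 2: skipped on both sides
      rw [if_neg hx]
      have hs : pvStepF f (most, comp) x = (most, comp) := by
        simp only [pvStepF]; rw [if_pos (by omega)]
      rw [hs, ih most comp hc]
      have hne : ¬ (f x == comp) = true := by simp only [beq_iff_eq]; omega
      have hne2 : ¬ (f x == pvG f xs comp) = true := by
        simp only [beq_iff_eq]
        rcases pvG_cases f xs comp (Or.inr hc) with h0 | h2
        · have := pvG_le f xs comp; omega
        · omega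
      split
      · simp [hne]
      · simp [hne2]

-- A from the initial state ([], 0)
theorem mostF_start (f : String → Nat) (xs : List String) :
    (xs.foldl (pvStepF f) ([], 0)).1 =
      if pvG f xs 0 = 0 then [] else xs.filter (fun r => f r == pvG f xs 0) := by
  induction xs with
  | nil => simp [pvG_nil]
  | cons x xs ih =>
    rw [List.foldl_cons, pvG_cons]
    by_cases hx : 2 ≤ f x
    · rw [if_pos hx]
      have hs : pvStepF f ([], 0) x = ([x], f x) := by
        simp only [pvStepF]
        rw [if_neg (by omega), if_neg (by simp only [beq_iff_eq]; omega),
          if_pos (by simp only [gt_iff_lt]; omega)]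
      rw [hs, max_eq_right (Nat.zero_le _), mostF_eq f xs [x] _ hx]
      have hgle := pvG_le f xs (f x)
      have hG0 : ¬ pvG f xs (f x) = 0 := by omega
      rw [if_neg hG0]
      split
      · next hg => rw [hg]; simp
      · next hg =>
        have hne2 : ¬ (f x == pvG f xs (f x)) = true := by simp only [beq_iff_eq]; omega
        simp [hne2]
    · rw [if_neg hx]
      have hs : pvStepF f ([], 0) x = ([], 0) := by
        simp only [pvStepF]; rw [if_pos (by omega)]
      rw [hs, ih]
      split
      · rfl
      · next hg =>
        rcases pvG_cases f xs 0 (Or.inl rfl) with h0 | h2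
        · exact absurd h0 hg
        · have hne2 : ¬ (f x == pvG f xs 0) = true := by simp only [beq_iff_eq]; omega
          simp [hne2]

-- B's max-with-default-0 equals the running maximum pvG from 0
theorem pvG_eq_foldl_filter (f : String → Nat) (xs : List String) (a : Nat) :
    pvG f xs a = ((xs.filter (fun r => 2 ≤ f r)).map f).foldl max a := by
  induction xs generalizing a with
  | nil => simp [pvG_nil]
  | cons x xs ih =>
    rw [pvG_cons]
    by_cases hx : 2 ≤ f x
    · rw [if_pos hx]
      simp only [List.filter_cons, hx, decide_true, if_true, List.map_cons, List.foldl_cons]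
      exact ih _
    · rw [if_neg hx]
      simp only [List.filter_cons, hx, decide_false, Bool.false_eq_true, if_false]
      exact ih a

theorem best_eq_pvG (f : String → Nat) (xs : List String) :
    (match PySem.List.max? ((xs.filter (fun r => 2 ≤ f r)).map f) (fun y => y) with
      | some m => m
      | none => 0) = pvG f xs 0 := by
  rw [pvG_eq_foldl_filter]
  cases h : (xs.filter (fun r => 2 ≤ f r)).map f with
  | nil => simp [PySem.List.max?]
  | cons y t =>
    rw [PySem.List.max?_id_cons]
    simp [List.foldl_cons]

-- casting a running Nat max into Int
theorem foldl_max_cast (t : List Nat) (a : Nat) :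
    (t.map (fun (n : Nat) => (n : Int))).foldl max ((a : Nat) : Int) = ((t.foldl max a : Nat) : Int) := by
  induction t generalizing a with
  | nil => simp
  | cons y t ih =>
    rw [List.map_cons, List.foldl_cons, List.foldl_cons, ← Nat.cast_max, ih]

-- max of a list of casts is the cast of the max
theorem max?_map_cast (l : List Nat) :
    PySem.List.max? (l.map (fun (n : Nat) => (n : Int))) (fun y => y) =
      (PySem.List.max? l (fun y => y)).map (fun (n : Nat) => (n : Int)) := by
  cases l with
  | nil => simp [PySem.List.max?]
  | cons y t =>
    rw [List.map_cons, PySem.List.max?_id_cons, PySem.List.max?_id_cons, Option.map_some,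
      foldl_max_cast]

-- B's body, with the tally lookups replaced by casts of an abstract Nat count f
theorem altB_eq (f : String → Nat) (result : List String) :
    (if (match PySem.List.max?
            ((result.filter (fun r => 2 ≤ ((f r : Nat) : Int))).map (fun r => ((f r : Nat) : Int)))
            (fun y => y) with
          | some m => m
          | none => 0) < 2 then []
      else result.filter (fun r => ((f r : Nat) : Int) ==
        (match PySem.List.max?
            ((result.filter (fun r => 2 ≤ ((f r : Nat) : Int))).map (fun r => ((f r : Nat) : Int)))
            (fun y => y) with
          | some m => m
          | none => 0))) =
      if pvG f result 0 = 0 then []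
      else result.filter (fun r => f r == pvG f result 0) := by
  have hfil : (fun r => decide ((2 : Int) ≤ ((f r : Nat) : Int))) = (fun r => decide (2 ≤ f r)) :=
    funext fun r => decide_eq_decide.mpr (by exact_mod_cast Iff.rfl)
  have hmap : (fun r => ((f r : Nat) : Int)) = (fun (n : Nat) => (n : Int)) ∘ f := rfl
  rw [hfil, hmap, ← List.map_map, max?_map_cast]
  have hG := best_eq_pvG f result
  cases hopt : PySem.List.max? ((result.filter (fun r => 2 ≤ f r)).map f) (fun y => y) with
  | none =>
    rw [hopt] at hG
    have hG0 : pvG f result 0 = 0 := by simpa using hG.symm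
    simp only [Option.map_none]
    rw [if_pos (by norm_num), if_pos hG0]
  | some m =>
    rw [hopt] at hG
    have hm : m = pvG f result 0 := by simpa using hG
    simp only [Option.map_some]
    rcases pvG_cases f result 0 (Or.inl rfl) with h0 | h2
    · rw [hm, h0, if_pos (by norm_num), if_pos rfl]
    · have h2m : (2 : Int) ≤ (m : Int) := by exact_mod_cast hm ▸ h2
      rw [if_neg (not_lt.mpr h2m), if_neg (by omega), hm]
      congr 1
      funext r
      simp

-- ===== VERDICT (by name: the statement is the Claim_ definition above) =====
theorem remain_most_region_spec : Claim_equal_remain_most_region := by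
  intro result sentences _
  unfold Spec_remain_most_region remain_most_region remain_most_region_alt
  rw [stepA_eq_stepF]
  rw [mostF_start (fun r => PySem.List.count sentences r) result]
  simp only [PySem.Dict.foldl_insert_getD_add_one_eq_counter, PySem.Dict.getD_counter,
    ← PySem.List.count_eq]
  exact (altB_eq (fun r => PySem.List.count sentences r) result).symm
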